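-- pv_equiv track=rewrite | github.com/AFE99/TPI-Complejidad | ProgramacionDinamica.py | intereses
-- ===== SOURCE A (Python) =====
-- def intereses(F,I,n,m):
--    for i in range (0,n):
--        I[i][0]=0
--    for j in range (m+1):
--        I[0][j]=F[0][j]
--    for i in range (1,n):
--        for j in range (1,m+1):
--            I[i][j]=IntMax(I,F,i,j)
--    return(I[n-1][m])
--
-- def IntMax(I,F,i,j):
--    #maxim=0
--    #t=0
--    maxim=I[i-1][j]+F[i][0]
--    for t in range(1,j+1):
--        maxim=max(maxim,I[i-1][j-t]+F[i][t])
--    return (maxim)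
-- ===== SOURCE B (Python) =====
-- # Recursive top-down row construction: fila(i) builds DP row i as a fresh list from
-- # fila(i-1) and splices it into I (so I is updated like A does); no per-cell IntMax
-- # helper and no base-case loops. On the degenerate corners n <= 0 / m < 0 B leaves
-- # cells alone that A initialises unconditionally (see D_ in the claim).
-- def intereses(F, I, n, m):
--     def fila(i):
--         if i == 0:
--             row = [F[0][j] for j in range(m + 1)]
--         else:
--             prev = fila(i - 1)
--             row = [0] + [max(prev[j - t] + F[i][t] for t in range(j + 1))
--                          for j in range(1, m + 1)]
--         I[i][:len(row)] = row
--         return row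
--     if n > 0:
--         fila(n - 1)
--     return I[n - 1][m]
-- ===== Notes on version B (the rewrite author's own statement) =====
-- stated objective: alternative
-- what changed: B replaces A's three imperative loops plus per-cell IntMax helper by a single recursive function that builds each DP row as a fresh list from the previous row (comprehension gather over the whole row) and splices it into I, with the base cases inside the recursion instead of separate initialisation loops.
-- intended difference: On degenerate wraparound corners where the final read I[n-1][m] lands on a cell A initialised unconditionally -- n <= 0 with len(I) = 1-n, where A returns F[0][m] because its second loop copies F[0] into I[0] even with no rows to process, and n = 1 with m = -len(I[0]), where A returns the 0 its first loop wrote into column 0 -- B, which computes nothing there, returns the original I[n-1][m]; leaving I alone when there is nothing to compute is the natural choice on these unspecified corners. — e.g. on intereses([[5]], [[7]], 0, 0): A returns 5, B returns 7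
import Mathlib
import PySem

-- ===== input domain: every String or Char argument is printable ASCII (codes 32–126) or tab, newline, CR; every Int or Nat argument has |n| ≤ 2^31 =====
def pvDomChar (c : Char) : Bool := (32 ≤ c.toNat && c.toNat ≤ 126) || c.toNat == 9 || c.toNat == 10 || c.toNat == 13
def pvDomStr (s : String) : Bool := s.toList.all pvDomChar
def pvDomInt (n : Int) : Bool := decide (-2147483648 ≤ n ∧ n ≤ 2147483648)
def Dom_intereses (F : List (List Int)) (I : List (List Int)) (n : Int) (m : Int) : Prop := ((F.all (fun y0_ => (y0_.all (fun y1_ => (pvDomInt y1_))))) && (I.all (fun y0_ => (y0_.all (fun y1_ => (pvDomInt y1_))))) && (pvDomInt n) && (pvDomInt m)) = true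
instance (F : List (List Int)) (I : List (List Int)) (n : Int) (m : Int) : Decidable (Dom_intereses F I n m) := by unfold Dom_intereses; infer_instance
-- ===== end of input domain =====

-- B replaces A's three loops plus per-cell IntMax helper by one recursive function that
-- builds each DP row as a fresh list and splices it into I (alternative decomposition,
-- same cost); both mutate I, though not identically on the degenerate D_ corners, and the
-- equivalence proved is about the RETURN value only.

-- ===== PORT A =====
-- cell read A[i][j] and cell write A[i][j]=v via the PySem primitives (exact for the
-- non-negative in-range indices the admitted inputs use)
def pvCell (A : List (List Int)) (i j : Int) : Int :=
  PySem.List.pyGetD (PySem.List.pyGetD A i []) j 0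

def pvSet (A : List (List Int)) (i j : Int) (v : Int) : List (List Int) :=
  PySem.List.pySetD A i (PySem.List.pySetD (PySem.List.pyGetD A i []) j v)

def pvIntMax (I F : List (List Int)) (i j : Int) : Int :=
  (PySem.List.pyRange 1 (j+1) 1).foldl
    (fun maxim t => max maxim (pvCell I (i-1) (j-t) + pvCell F i t))
    (pvCell I (i-1) j + pvCell F i 0)

def intereses (F : List (List Int)) (I : List (List Int)) (n : Int) (m : Int) : Int :=
  let I1 := (PySem.List.pyRange 0 n 1).foldl (fun acc i => pvSet acc i 0 0) I
  let I2 := (PySem.List.pyRange 0 (m+1) 1).foldl (fun acc j => pvSet acc 0 j (pvCell F 0 j)) I1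
  let I3 := (PySem.List.pyRange 1 n 1).foldl
    (fun acc i => (PySem.List.pyRange 1 (m+1) 1).foldl
      (fun acc2 j => pvSet acc2 i j (pvIntMax acc2 F i j)) acc)
    I2
  pvCell I3 (n-1) m

-- ===== PORT B =====
-- fila(i) of Source B: row i built recursively from row i-1 and spliced into the table
-- (Python's I[i][:len(row)] = row); returns (row, updated table)
def spliceRow (T : List (List Int)) (i : Nat) (row : List Int) : List (List Int) :=
  PySem.List.pySetD T (i:Int) (row ++ (PySem.List.pyGetD T (i:Int) []).drop row.length)

def filaB (F : List (List Int)) (m : Int) : Nat → List (List Int) → List Int × List (List Int)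
  | 0, T =>
    let row := (PySem.List.pyRange 0 (m+1) 1).map (fun j => pvCell F 0 j)
    (row, spliceRow T 0 row)
  | i+1, T =>
    let p := filaB F m i T
    let row := [0] ++ (PySem.List.pyRange 1 (m+1) 1).map (fun j =>
      (PySem.List.pyRange 1 (j+1) 1).foldl
        (fun acc t => max acc (PySem.List.pyGetD p.1 (j-t) 0 + pvCell F ((i:Int)+1) t))
        (PySem.List.pyGetD p.1 j 0 + pvCell F ((i:Int)+1) 0))
    (row, spliceRow p.2 (i+1) row)

def intereses_alt (F : List (List Int)) (I : List (List Int)) (n : Int) (m : Int) : Int :=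
  let T := if 0 < n then (filaB F m (n-1).toNat I).2 else I
  pvCell T (n-1) m

-- ===== PRECONDITION & SPEC =====
-- Pre_ is exactly the inputs on which the Python A returns (no IndexError in the three
-- loops and a final read I[n-1][m] whose possibly negative indices are in wraparound
-- range); B returns on all of them too.
def Pre_intereses (F : List (List Int)) (I : List (List Int)) (n : Int) (m : Int) : Prop :=
  (0 < n → n ≤ (I.length:Int) ∧ ∀ i, i < n.toNat → 1 ≤ (I.getD i []).length) ∧
  (0 ≤ m → 1 ≤ I.length ∧ 1 ≤ F.length ∧ m+1 ≤ ((F.getD 0 []).length:Int)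
    ∧ m+1 ≤ ((I.getD 0 []).length:Int)) ∧
  (1 < n → 0 < m → n ≤ (F.length:Int) ∧ (∀ i, i < n.toNat → m+1 ≤ ((I.getD i []).length:Int))
    ∧ (∀ i, 1 ≤ i → i < n.toNat → m+1 ≤ ((F.getD i []).length:Int))) ∧
  PySem.Raise.InRange I.length (n-1) ∧
  PySem.Raise.InRange (PySem.List.pyGetD I (n-1) []).length m

instance (F : List (List Int)) (I : List (List Int)) (n : Int) (m : Int) : Decidable (Pre_intereses F I n m) := by
  unfold Pre_intereses; infer_instance

def pvWitness_intereses : List (List Int) × List (List Int) × Int × Int :=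
  ([[1, 2], [3, 4]], [[0, 0], [0, 0]], 2, 1)

-- On two degenerate wraparound corners A returns a cell it initialised unconditionally
-- while B, having no rows to process there, returns the original cell of I: for n ≤ 0 with
-- len(I) = 1-n (the final read wraps to row 0) A returns F[0][m] (its second loop copies F[0]
-- into I[0] even when n ≤ 0) where B returns I[0][m]; and for n = 1, m = -len(I[0]) (the read
-- wraps to column 0) A returns 0 (its first loop zeroes column 0 before deciding anything)
-- where B returns I[0][0]; B's choice — leave I alone when there is nothing to compute — is
-- the natural one on these unspecified corners.
def D_intereses (F : List (List Int)) (I : List (List Int)) (n : Int) (m : Int) : Prop :=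
  (n ≤ 0 ∧ 0 ≤ m ∧ (I.length:Int) = 1 - n
    ∧ (I.getD 0 []).getD m.toNat 0 ≠ (F.getD 0 []).getD m.toNat 0) ∨
  (n = 1 ∧ m < 0 ∧ ((I.getD 0 []).length:Int) + m = 0 ∧ (I.getD 0 []).getD 0 0 ≠ 0)

instance (F : List (List Int)) (I : List (List Int)) (n : Int) (m : Int) : Decidable (D_intereses F I n m) := by
  unfold D_intereses; infer_instance

def Spec_intereses (F : List (List Int)) (I : List (List Int)) (n : Int) (m : Int) (out : Int) : Prop := ¬ D_intereses F I n m → out = intereses_alt F I n m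
instance (F : List (List Int)) (I : List (List Int)) (n : Int) (m : Int) (out : Int) : Decidable (Spec_intereses F I n m out) := by unfold Spec_intereses; infer_instance

def pvDiffWitness_intereses : List (List Int) × List (List Int) × Int × Int :=
  ([[5]], [[7]], 0, 0)

def pvDiffWitnessOut_intereses : Int × Int := (5, 7)

-- ===== CLAIM (what is proved, stated in full; the proofs are below) =====
def Claim_unchanged_intereses : Prop := ∀ (F : List (List Int)) (I : List (List Int)) (n : Int) (m : Int), Dom_intereses F I n m → Pre_intereses F I n m → Spec_intereses F I n m (intereses F I n m)
def Claim_changed_intereses : Prop := Dom_intereses (pvDiffWitness_intereses.1) (pvDiffWitness_intereses.2.1) (pvDiffWitness_intereses.2.2.1) (pvDiffWitness_intereses.2.2.2) ∧ Pre_intereses (pvDiffWitness_intereses.1) (pvDiffWitness_intereses.2.1) (pvDiffWitness_intereses.2.2.1) (pvDiffWitness_intereses.2.2.2) ∧ D_intereses (pvDiffWitness_intereses.1) (pvDiffWitness_intereses.2.1) (pvDiffWitness_intereses.2.2.1) (pvDiffWitness_intereses.2.2.2) ∧ intereses (pvDiffWitness_intereses.1) (pvDiffWitness_intereses.2.1)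 (pvDiffWitness_intereses.2.2.1) (pvDiffWitness_intereses.2.2.2) = pvDiffWitnessOut_intereses.1 ∧ intereses_alt (pvDiffWitness_intereses.1) (pvDiffWitness_intereses.2.1) (pvDiffWitness_intereses.2.2.1) (pvDiffWitness_intereses.2.2.2) = pvDiffWitnessOut_intereses.2 ∧ pvDiffWitnessOut_intereses.1 ≠ pvDiffWitnessOut_intereses.2
def Claim_exact_intereses : Prop := ∀ (F : List (List Int)) (I : List (List Int)) (n : Int) (m : Int), Dom_intereses F I n m → Pre_intereses F I n m → D_intereses F I n m → intereses F I n m ≠ intereses_alt F I n m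

-- ===== LEMMAS AND PROOFS =====
-- the pure row recursion (B's fila without the table splice), used only by the proofs
def pureFila (F : List (List Int)) (m : Int) : Nat → List Int
  | 0 => (PySem.List.pyRange 0 (m+1) 1).map (fun j => pvCell F 0 j)
  | i+1 =>
    let prev := pureFila F m i
    [0] ++ (PySem.List.pyRange 1 (m+1) 1).map (fun j =>
      (PySem.List.pyRange 1 (j+1) 1).foldl
        (fun acc t => max acc (PySem.List.pyGetD prev (j-t) 0 + pvCell F ((i:Int)+1) t))
        (PySem.List.pyGetD prev j 0 + pvCell F ((i:Int)+1) 0))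


-- the mathematical value of a gathered row cell: max over t ≤ j of p[j-t] + f[t], folded as A folds it
def gmax (p f : List Int) (j : Nat) : Int :=
  (List.range j).foldl (fun acc t => max acc (p.getD (j-1-t) 0 + f.getD (t+1) 0))
    (p.getD j 0 + f.getD 0 0)

theorem gmax_congr (p q f : List Int) (j : Nat)
    (h : ∀ t, t ≤ j → p.getD t 0 = q.getD t 0) : gmax p f j = gmax q f j := by
  unfold gmax
  rw [h j (le_refl j)]
  apply List.foldl_ext
  intro acc t ht
  simp only [List.mem_range] at ht
  rw [h (j-1-t) (by omega)]

-- ---------- table cells and single-cell updates ----------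

def cellN (A : List (List Int)) (i j : Nat) : Int := (A.getD i []).getD j 0

def setN (A : List (List Int)) (i j : Nat) (v : Int) : List (List Int) :=
  A.set i ((A.getD i []).set j v)

theorem getD_set_int (xs : List Int) (n : Nat) (v : Int) (j : Nat) :
    (xs.set n v).getD j 0 = if j = n ∧ n < xs.length then v else xs.getD j 0 := by
  rw [List.getD_eq_getElem?_getD, List.getD_eq_getElem?_getD, List.getElem?_set]
  by_cases h1 : n = j
  · subst h1
    rw [if_pos rfl]
    by_cases h2 : n < xs.length
    · rw [if_pos h2, if_pos ⟨rfl, h2⟩]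
      rfl
    · rw [if_neg h2, if_neg (fun hc => h2 hc.2), List.getElem?_eq_none (by omega)]
  · rw [if_neg h1, if_neg (fun hc => h1 hc.1.symm)]

theorem pvCell_natCast (A : List (List Int)) (i j : Nat) : pvCell A (i:Int) (j:Int) = cellN A i j := by
  simp [pvCell, cellN]

theorem pvSet_natCast (A : List (List Int)) (i j : Nat) (v : Int) :
    pvSet A (i:Int) (j:Int) v = setN A i j v := by
  simp [pvSet, setN]

theorem length_setN (A : List (List Int)) (i j : Nat) (v : Int) :
    (setN A i j v).length = A.length := by
  simp [setN]

theorem row_setN_ne (A : List (List Int)) (i j : Nat) (v : Int) (i' : Nat) (h : i' ≠ i) :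
    (setN A i j v).getD i' [] = A.getD i' [] := by
  unfold setN
  rw [List.getD_eq_getElem?_getD, List.getElem?_set, if_neg (by omega),
    ← List.getD_eq_getElem?_getD]

theorem row_setN_self (A : List (List Int)) (i j : Nat) (v : Int) :
    (setN A i j v).getD i [] = (A.getD i []).set j v := by
  unfold setN
  rw [List.getD_eq_getElem?_getD, List.getElem?_set, if_pos rfl]
  split_ifs with h
  · rfl
  · rw [List.getD_eq_getElem?_getD, List.getElem?_eq_none (by omega)]
    rfl

theorem pvSet_cast_succ (A : List (List Int)) (i k : Nat) (v : Int) :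
    pvSet A (i:Int) ((k:Int)+1) v = setN A i (k+1) v := by
  rw [show (k:Int)+1 = ((k+1:Nat):Int) from by push_cast; ring, pvSet_natCast]

-- ---------- A's IntMax against gmax ----------

theorem pvIntMax_eq (T F : List (List Int)) (i jN : Nat) (p : List Int)
    (hp : ∀ j' ≤ jN, cellN T i j' = p.getD j' 0) :
    pvIntMax T F ((i:Int)+1) (jN:Int) = gmax p (F.getD (i+1) []) jN := by
  have hii : (i:Int)+1-1 = (i:Int) := by ring
  have hi1 : (i:Int)+1 = ((i+1:Nat):Int) := by push_cast; ring
  unfold pvIntMax gmax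
  have hrange : PySem.List.pyRange 1 ((jN:Int)+1) 1
      = (List.range jN).map (fun k : Nat => (1:Int)+(k:Int)) := by
    rw [PySem.List.pyRange_one]
    simp
  rw [hrange, List.foldl_map]
  have hinit : pvCell T ((i:Int)+1-1) (jN:Int) + pvCell F ((i:Int)+1) 0
      = p.getD jN 0 + (F.getD (i+1) []).getD 0 0 := by
    rw [hii, hi1]
    simp only [pvCell, PySem.List.pyGetD_natCast, PySem.List.pyGetD_zero]
    have h := hp jN (le_refl jN)
    unfold cellN at h
    rw [h]
  rw [hinit]
  apply List.foldl_ext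
  intro acc t ht
  simp only [List.mem_range] at ht
  congr 1
  have e1 : (jN:Int)-(1+(t:Int)) = ((jN-1-t:Nat):Int) := by omega
  have e2 : (1:Int)+(t:Int) = ((t+1:Nat):Int) := by omega
  rw [hii, e1, e2, pvCell_natCast, hi1, pvCell_natCast]
  have h := hp (jN-1-t) (by omega)
  unfold cellN at h
  unfold cellN
  rw [h]

theorem pvIntMax_eq2 (T F : List (List Int)) (iN jN : Nat) (h1 : 1 ≤ iN) (p : List Int)
    (hp : T.getD (iN-1) [] = p) :
    pvIntMax T F (iN:Int) ((jN:Int)+1) = gmax p (F.getD iN []) (jN+1) := by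
  have h := pvIntMax_eq T F (iN-1) (jN+1) p (fun j' _ => by unfold cellN; rw [hp])
  rw [show ((iN-1:Nat):Int)+1 = (iN:Int) from by omega,
    show ((jN+1:Nat):Int) = (jN:Int)+1 from by push_cast; ring,
    show (iN-1)+1 = iN from by omega] at h
  exact h

-- ---------- the gather row of A's third loop ----------

theorem rowA_spec (F acc : List (List Int)) (iN : Nat) (h1 : 1 ≤ iN) (k : Nat) :
    ((PySem.List.pyRange 1 ((k:Int)+1) 1).foldl
      (fun a j => pvSet a (iN:Int) j (pvIntMax a F (iN:Int) j)) acc).length = acc.length ∧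
    (∀ i', i' ≠ iN → ((PySem.List.pyRange 1 ((k:Int)+1) 1).foldl
      (fun a j => pvSet a (iN:Int) j (pvIntMax a F (iN:Int) j)) acc).getD i' [] = acc.getD i' []) ∧
    (((PySem.List.pyRange 1 ((k:Int)+1) 1).foldl
      (fun a j => pvSet a (iN:Int) j (pvIntMax a F (iN:Int) j)) acc).getD iN []).length
      = (acc.getD iN []).length ∧
    (∀ j', (((PySem.List.pyRange 1 ((k:Int)+1) 1).foldl
      (fun a j => pvSet a (iN:Int) j (pvIntMax a F (iN:Int) j)) acc).getD iN []).getD j' 0 =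
      if 1 ≤ j' ∧ j' ≤ k ∧ j' < (acc.getD iN []).length
      then gmax (acc.getD (iN-1) []) (F.getD iN []) j'
      else (acc.getD iN []).getD j' 0) := by
  induction k with
  | zero =>
    rw [show ((0:Nat):Int)+1 = 1 from by norm_num, PySem.List.pyRange_one_eq_nil (le_refl 1)]
    refine ⟨rfl, fun _ _ => rfl, rfl, ?_⟩
    intro j'
    rw [if_neg (by omega)]
    rfl
  | succ k ih =>
    obtain ⟨ihl, ihne, ihrl, ihg⟩ := ih
    rw [show ((k+1:Nat):Int)+1 = ((k:Int)+1)+1 from by push_cast; ring,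
      PySem.List.pyRange_one_succ_right (by omega : (1:Int) ≤ (k:Int)+1),
      List.foldl_append]
    simp only [List.foldl_cons, List.foldl_nil]
    set R := (PySem.List.pyRange 1 ((k:Int)+1) 1).foldl
      (fun a j => pvSet a (iN:Int) j (pvIntMax a F (iN:Int) j)) acc with hR
    have hmax : pvIntMax R F (iN:Int) ((k:Int)+1)
        = gmax (acc.getD (iN-1) []) (F.getD iN []) (k+1) :=
      pvIntMax_eq2 R F iN k h1 _ (ihne (iN-1) (by omega))
    rw [hmax, pvSet_cast_succ]
    refine ⟨?_, ?_, ?_, ?_⟩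
    · rw [length_setN, ihl]
    · intro i' hne
      rw [row_setN_ne _ _ _ _ _ hne, ihne i' hne]
    · rw [row_setN_self, List.length_set, ihrl]
    · intro j'
      rw [row_setN_self, getD_set_int, ihg j', ihrl]
      by_cases hj : j' = k+1
      · by_cases hin : k+1 < (acc.getD iN []).length
        · rw [if_pos ⟨hj, hin⟩,
            if_pos (show 1 ≤ j' ∧ j' ≤ k+1 ∧ j' < (acc.getD iN []).length by omega), hj]
        · rw [if_neg (by omega), if_neg (by omega), if_neg (by omega)]
      · rw [if_neg (by omega)]
        by_cases hc : 1 ≤ j' ∧ j' ≤ k ∧ j' < (acc.getD iN []).length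
        · rw [if_pos hc, if_pos (by omega)]
        · rw [if_neg hc, if_neg (by omega)]

-- ---------- A's first loop (column 0 := 0) ----------

theorem loop1_spec (I : List (List Int)) (N : Nat) :
    ((PySem.List.pyRange 0 (N:Int) 1).foldl (fun acc i => pvSet acc i 0 0) I).length = I.length ∧
    (∀ r, (((PySem.List.pyRange 0 (N:Int) 1).foldl (fun acc i => pvSet acc i 0 0) I).getD r []).length
      = (I.getD r []).length) ∧
    (∀ r, N ≤ r → ((PySem.List.pyRange 0 (N:Int) 1).foldl (fun acc i => pvSet acc i 0 0) I).getD r []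
      = I.getD r []) ∧
    (∀ r, r < N → ((PySem.List.pyRange 0 (N:Int) 1).foldl (fun acc i => pvSet acc i 0 0) I).getD r []
      = (I.getD r []).set 0 0) := by
  induction N with
  | zero =>
    rw [show ((0:Nat):Int) = 0 from rfl, PySem.List.pyRange_one_eq_nil (le_refl 0)]
    exact ⟨rfl, fun _ => rfl, fun _ _ => rfl, fun r hr => absurd hr (by omega)⟩
  | succ N ih =>
    obtain ⟨ihl, ihrl, ihhi, ihlo⟩ := ih
    rw [show ((N+1:Nat):Int) = (N:Int)+1 from by push_cast; ring,
      PySem.List.pyRange_one_succ_right (by omega : (0:Int) ≤ (N:Int)),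
      List.foldl_append]
    simp only [List.foldl_cons, List.foldl_nil]
    set R := (PySem.List.pyRange 0 (N:Int) 1).foldl (fun acc i => pvSet acc i 0 0) I with hR
    rw [show pvSet R (N:Int) 0 0 = setN R N 0 0 from by
      rw [show (0:Int) = ((0:Nat):Int) from rfl, pvSet_natCast]]
    refine ⟨by rw [length_setN, ihl], ?_, ?_, ?_⟩
    · intro r
      by_cases hr : r = N
      · rw [hr, row_setN_self, List.length_set, ihrl]
      · rw [row_setN_ne _ _ _ _ _ hr, ihrl]
    · intro r hr
      rw [row_setN_ne _ _ _ _ _ (by omega), ihhi r (by omega)]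
    · intro r hr
      by_cases h : r = N
      · rw [h, row_setN_self, ihhi N (le_refl N)]
      · rw [row_setN_ne _ _ _ _ _ h, ihlo r (by omega)]

-- ---------- A's second loop (row 0 := F[0]) ----------

theorem loop2_spec (F T : List (List Int)) (K : Nat) :
    ((PySem.List.pyRange 0 (K:Int) 1).foldl (fun acc j => pvSet acc 0 j (pvCell F 0 j)) T).length = T.length ∧
    (∀ r, r ≠ 0 → ((PySem.List.pyRange 0 (K:Int) 1).foldl (fun acc j => pvSet acc 0 j (pvCell F 0 j)) T).getD r []
      = T.getD r []) ∧
    ((((PySem.List.pyRange 0 (K:Int) 1).foldl (fun acc j => pvSet acc 0 j (pvCell F 0 j)) T).getD 0 []).length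
      = (T.getD 0 []).length) ∧
    (∀ j, (((PySem.List.pyRange 0 (K:Int) 1).foldl (fun acc j => pvSet acc 0 j (pvCell F 0 j)) T).getD 0 []).getD j 0
      = if j < K ∧ j < (T.getD 0 []).length then cellN F 0 j else (T.getD 0 []).getD j 0) := by
  induction K with
  | zero =>
    rw [show ((0:Nat):Int) = 0 from rfl, PySem.List.pyRange_one_eq_nil (le_refl 0)]
    exact ⟨rfl, fun _ _ => rfl, rfl, fun j => by rw [if_neg (by omega)]; rfl⟩
  | succ K ih =>
    obtain ⟨ihl, ihne, ihrl, ihg⟩ := ih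
    rw [show ((K+1:Nat):Int) = (K:Int)+1 from by push_cast; ring,
      PySem.List.pyRange_one_succ_right (by omega : (0:Int) ≤ (K:Int)),
      List.foldl_append]
    simp only [List.foldl_cons, List.foldl_nil]
    set R := (PySem.List.pyRange 0 (K:Int) 1).foldl (fun acc j => pvSet acc 0 j (pvCell F 0 j)) T with hR
    rw [show pvSet R (0:Int) (K:Int) (pvCell F 0 (K:Int)) = setN R 0 K (cellN F 0 K) from by
      rw [show (0:Int) = ((0:Nat):Int) from rfl, pvCell_natCast, pvSet_natCast]]
    refine ⟨by rw [length_setN, ihl], ?_, ?_, ?_⟩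
    · intro r hr
      rw [row_setN_ne _ _ _ _ _ hr, ihne r hr]
    · rw [row_setN_self, List.length_set, ihrl]
    · intro j
      rw [row_setN_self, getD_set_int, ihg j, ihrl]
      by_cases hj : j = K
      · by_cases hin : K < (T.getD 0 []).length
        · rw [if_pos ⟨hj, hin⟩, if_pos (by omega), hj]
        · rw [if_neg (by omega), if_neg (by omega), if_neg (by omega)]
      · rw [if_neg (by omega)]
        by_cases hc : j < K ∧ j < (T.getD 0 []).length
        · rw [if_pos hc, if_pos (by omega)]
        · rw [if_neg hc, if_neg (by omega)]

-- ---------- B's rows in closed getD form ----------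

theorem pureFila_zero (F : List (List Int)) (m j : Nat) (hj : j ≤ m) :
    (pureFila F (m:Int) 0).getD j 0 = cellN F 0 j := by
  show ((PySem.List.pyRange 0 ((m:Int)+1) 1).map (fun j => pvCell F 0 j)).getD j 0 = cellN F 0 j
  rw [show (m:Int)+1 = ((m+1:Nat):Int) from by push_cast; ring]
  rw [show PySem.List.pyRange 0 ((m+1:Nat):Int) 1 = (List.range (m+1)).map (fun k : Nat => (k:Int)) from by
    rw [PySem.List.pyRange_one]; simp]
  rw [List.map_map, List.getD_eq_getElem?_getD, List.getElem?_map, List.getElem?_range (by omega : j < m+1)]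
  simp only [Option.map_some, Option.getD_some, Function.comp_apply]
  rw [show (0:Int) = ((0:Nat):Int) from rfl, pvCell_natCast]

theorem pureFila_succ_zero (F : List (List Int)) (m : Int) (r : Nat) :
    (pureFila F m (r+1)).getD 0 0 = 0 := by
  rfl

theorem pureFila_succ (F : List (List Int)) (m r j : Nat) (hj : j < m) :
    (pureFila F (m:Int) (r+1)).getD (j+1) 0 = gmax (pureFila F (m:Int) r) (F.getD (r+1) []) (j+1) := by
  have hdef : pureFila F (m:Int) (r+1) = [0] ++ (PySem.List.pyRange 1 ((m:Int)+1) 1).map (fun jj =>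
      (PySem.List.pyRange 1 (jj+1) 1).foldl
        (fun acc t => max acc (PySem.List.pyGetD (pureFila F (m:Int) r) (jj-t) 0 + pvCell F ((r:Int)+1) t))
        (PySem.List.pyGetD (pureFila F (m:Int) r) jj 0 + pvCell F ((r:Int)+1) 0)) := rfl
  rw [hdef, List.singleton_append, List.getD_cons_succ]
  rw [show PySem.List.pyRange 1 ((m:Int)+1) 1 = (List.range m).map (fun k : Nat => (1:Int)+(k:Int)) from by
    rw [PySem.List.pyRange_one]; simp]
  rw [List.map_map, List.getD_eq_getElem?_getD, List.getElem?_map, List.getElem?_range hj]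
  simp only [Option.map_some, Option.getD_some, Function.comp_apply]
  set p := pureFila F (m:Int) r with hp
  unfold gmax
  rw [show PySem.List.pyRange 1 ((1:Int)+(j:Int)+1) 1 = (List.range (j+1)).map (fun k : Nat => (1:Int)+(k:Int)) from by
    rw [PySem.List.pyRange_one, show ((1:Int)+(j:Int)+1-1).toNat = j+1 from by omega]]
  rw [List.foldl_map]
  have hinit : PySem.List.pyGetD p ((1:Int)+(j:Int)) 0 + pvCell F ((r:Int)+1) 0
      = p.getD (j+1) 0 + (F.getD (r+1) []).getD 0 0 := by
    rw [show (1:Int)+(j:Int) = ((j+1:Nat):Int) from by push_cast; ring, PySem.List.pyGetD_natCast,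
      show (r:Int)+1 = ((r+1:Nat):Int) from by push_cast; ring,
      show (0:Int) = ((0:Nat):Int) from rfl, pvCell_natCast]
    rfl
  rw [hinit]
  apply List.foldl_ext
  intro acc t ht
  simp only [List.mem_range] at ht
  congr 1
  rw [show (1:Int)+(j:Int)-((1:Int)+(t:Int)) = ((j-t:Nat):Int) from by omega,
    PySem.List.pyGetD_natCast,
    show (r:Int)+1 = ((r+1:Nat):Int) from by push_cast; ring,
    show (1:Int)+(t:Int) = ((t+1:Nat):Int) from by push_cast; ring, pvCell_natCast,
    show j+1-1-t = j-t from by omega]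
  rfl

-- ---------- A's third loop against B's rows ----------

theorem loop3_spec (F : List (List Int)) (m K : Nat) (I2 : List (List Int))
    (hK : K < I2.length)
    (hlen : ∀ r, r ≤ K → m < (I2.getD r []).length)
    (h0 : ∀ j, j ≤ m → (I2.getD 0 []).getD j 0 = (pureFila F (m:Int) 0).getD j 0)
    (hc : ∀ r, 1 ≤ r → r ≤ K → (I2.getD r []).getD 0 0 = 0) :
    ((PySem.List.pyRange 1 ((K:Int)+1) 1).foldl
        (fun acc i => (PySem.List.pyRange 1 ((m:Int)+1) 1).foldl
          (fun a j => pvSet a i j (pvIntMax a F i j)) acc) I2).length = I2.length ∧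
    (∀ r, ((((PySem.List.pyRange 1 ((K:Int)+1) 1).foldl
        (fun acc i => (PySem.List.pyRange 1 ((m:Int)+1) 1).foldl
          (fun a j => pvSet a i j (pvIntMax a F i j)) acc) I2).getD r []).length)
      = (I2.getD r []).length) ∧
    (∀ r, K < r → ((PySem.List.pyRange 1 ((K:Int)+1) 1).foldl
        (fun acc i => (PySem.List.pyRange 1 ((m:Int)+1) 1).foldl
          (fun a j => pvSet a i j (pvIntMax a F i j)) acc) I2).getD r [] = I2.getD r []) ∧
    (∀ r, r ≤ K → ∀ j, j ≤ m →
      (((PySem.List.pyRange 1 ((K:Int)+1) 1).foldl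
        (fun acc i => (PySem.List.pyRange 1 ((m:Int)+1) 1).foldl
          (fun a j => pvSet a i j (pvIntMax a F i j)) acc) I2).getD r []).getD j 0
      = (pureFila F (m:Int) r).getD j 0) := by
  induction K with
  | zero =>
    rw [show ((0:Nat):Int)+1 = 1 from by norm_num, PySem.List.pyRange_one_eq_nil (le_refl 1)]
    refine ⟨rfl, fun _ => rfl, fun _ _ => rfl, ?_⟩
    intro r hr j hjm
    have : r = 0 := by omega
    subst this
    exact h0 j hjm
  | succ K ih =>
    obtain ⟨ihl, ihrl, ihhi, ihval⟩ := ih (by omega) (fun r hr => hlen r (by omega))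
      (fun r h1 h2 => hc r h1 (by omega))
    rw [show ((K+1:Nat):Int)+1 = ((K:Int)+1)+1 from by push_cast; ring,
      PySem.List.pyRange_one_succ_right (by omega : (1:Int) ≤ (K:Int)+1),
      List.foldl_append]
    simp only [List.foldl_cons, List.foldl_nil]
    set T := (PySem.List.pyRange 1 ((K:Int)+1) 1).foldl
      (fun acc i => (PySem.List.pyRange 1 ((m:Int)+1) 1).foldl
        (fun a j => pvSet a i j (pvIntMax a F i j)) acc) I2 with hT
    rw [show ((K:Int)+1) = ((K+1:Nat):Int) from by push_cast; ring]
    obtain ⟨rl, rne, rrl, rg⟩ := rowA_spec F T (K+1) (by omega) m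
    have hTrow : T.getD (K+1) [] = I2.getD (K+1) [] := ihhi (K+1) (by omega)
    have hTlen : m < (T.getD (K+1) []).length := by rw [hTrow]; exact hlen (K+1) (le_refl _)
    refine ⟨by rw [rl, ihl], ?_, ?_, ?_⟩
    · intro r
      by_cases hr : r = K+1
      · rw [hr, rrl, ihrl]
      · rw [rne r hr, ihrl]
    · intro r hr
      rw [rne r (by omega), ihhi r (by omega)]
    · intro r hr j hjm
      by_cases hrK : r ≤ K
      · rw [rne r (by omega), ihval r hrK j hjm]
      · have : r = K+1 := by omega
        subst this
        rw [rg j]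
        cases j with
        | zero =>
          rw [if_neg (by omega), hTrow, hc (K+1) (by omega) (le_refl _)]
          exact (pureFila_succ_zero F (m:Int) K).symm
        | succ j0 =>
          rw [if_pos ⟨by omega, by omega, by omega⟩,
            gmax_congr (T.getD (K+1-1) []) (pureFila F (m:Int) K) (F.getD (K+1) []) (j0+1)
              (fun t ht => by
                rw [show K+1-1 = K from by omega]
                exact ihval K (le_refl K) t (by omega)),
            pureFila_succ F m K j0 (by omega)]

-- ---------- generic row update ----------

theorem getD_append_left (a b : List Int) (j : Nat) (h : j < a.length) :
    (a ++ b).getD j 0 = a.getD j 0 := by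
  rw [List.getD_eq_getElem?_getD, List.getElem?_append_left h, ← List.getD_eq_getElem?_getD]

theorem getD_drop (l : List Int) (k j : Nat) : (l.drop k).getD j 0 = l.getD (k+j) 0 := by
  rw [List.getD_eq_getElem?_getD, List.getElem?_drop, ← List.getD_eq_getElem?_getD]

theorem foldl_const (l : List Int) (b : List (List Int)) : l.foldl (fun a _ => a) b = b := by
  induction l generalizing b with
  | nil => rfl
  | cons x xs ih => exact ih b

theorem pyGetD_nonneg_getD (xs : List Int) (i : Int) (d : Int) (h0 : 0 ≤ i) (h : i < (xs.length:Int)) :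
    PySem.List.pyGetD xs i d = xs.getD i.toNat d := by
  have h2 := PySem.List.pyGetD_eq_getElem (xs := xs) (d := d) h0 h
  rw [h2, List.getD_eq_getElem?_getD, List.getElem?_eq_getElem (by omega)]
  rfl

theorem pyGetD_neg_getD (xs : List Int) (k : Nat) (d : Int) (h1 : 0 < k) (h2 : k ≤ xs.length) :
    PySem.List.pyGetD xs (-(k:Int)) d = xs.getD (xs.length - k) d := by
  rw [PySem.List.pyGetD_neg_natCast xs k d h1 h2, List.getD_eq_getElem?_getD,
    List.getElem?_eq_getElem (by omega)]
  rfl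

theorem pyGetD_neg_getD' (xs : List Int) (i d : Int) (h1 : i < 0) (h2 : -((xs.length:Nat):Int) ≤ i) :
    PySem.List.pyGetD xs i d = xs.getD (xs.length - (-i).toNat) d := by
  have hcast : i = -((((-i).toNat:Nat)):Int) := by omega
  rw [hcast, pyGetD_neg_getD xs (-i).toNat d (by omega) (by omega)]
  congr 2
  omega

theorem pyGetD_neg_getD_row (xs : List (List Int)) (k : Nat) (h1 : 0 < k) (h2 : k ≤ xs.length) :
    PySem.List.pyGetD xs (-(k:Int)) [] = xs.getD (xs.length - k) [] := by
  rw [PySem.List.pyGetD_neg_natCast xs k [] h1 h2, List.getD_eq_getElem?_getD,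
    List.getElem?_eq_getElem (by omega)]
  rfl


theorem getD_set_row (T : List (List Int)) (nn : Nat) (v : List Int) (r : Nat) :
    (T.set nn v).getD r [] = if r = nn ∧ nn < T.length then v else T.getD r [] := by
  rw [List.getD_eq_getElem?_getD, List.getD_eq_getElem?_getD, List.getElem?_set]
  by_cases h1 : nn = r
  · subst h1
    rw [if_pos rfl]
    by_cases h2 : nn < T.length
    · rw [if_pos h2, if_pos ⟨rfl, h2⟩]
      rfl
    · rw [if_neg h2, if_neg (fun hc => h2 hc.2), List.getElem?_eq_none (by omega)]
  · rw [if_neg h1, if_neg (fun hc => h1 hc.1.symm)]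

theorem spliceRow_eq (T : List (List Int)) (i : Nat) (row : List Int) :
    spliceRow T i row = T.set i (row ++ (T.getD i []).drop row.length) := by
  unfold spliceRow
  rw [PySem.List.pySetD_natCast, PySem.List.pyGetD_natCast]

-- ---------- B's stateful recursion against the pure rows ----------

theorem filaB_fst (F : List (List Int)) (m : Int) (i : Nat) (T : List (List Int)) :
    (filaB F m i T).1 = pureFila F m i := by
  induction i generalizing T with
  | zero => rfl
  | succ i ih => simp only [filaB, pureFila, ih]

theorem filaB_snd_zero (F : List (List Int)) (m : Int) (T : List (List Int)) :
    (filaB F m 0 T).2 = spliceRow T 0 (pureFila F m 0) := rfl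

theorem filaB_snd_succ (F : List (List Int)) (m : Int) (i : Nat) (T : List (List Int)) :
    (filaB F m (i+1) T).2 = spliceRow (filaB F m i T).2 (i+1) (pureFila F m (i+1)) := by
  simp only [filaB, pureFila, filaB_fst]

theorem length_filaB_snd (F : List (List Int)) (m : Int) (i : Nat) (T : List (List Int)) :
    ((filaB F m i T).2).length = T.length := by
  induction i generalizing T with
  | zero => rw [filaB_snd_zero, spliceRow_eq, List.length_set]
  | succ i ih => rw [filaB_snd_succ, spliceRow_eq, List.length_set, ih]

theorem length_pureFila_zero (F : List (List Int)) (m : Int) (hm : 0 ≤ m) :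
    (pureFila F m 0).length = m.toNat + 1 := by
  show ((PySem.List.pyRange 0 (m+1) 1).map (fun j => pvCell F 0 j)).length = m.toNat + 1
  rw [List.length_map, PySem.List.length_pyRange_one]
  omega

theorem length_pureFila_succ (F : List (List Int)) (m : Int) (hm : 0 ≤ m) (i : Nat) :
    (pureFila F m (i+1)).length = m.toNat + 1 := by
  show ([0] ++ _).length = m.toNat + 1
  rw [List.length_append, List.length_map, PySem.List.length_pyRange_one]
  simp only [List.length_singleton]
  omega

-- the final read of B in the main case: cell (i, m) of the spliced table is row i's cell m
theorem read_filaB_snd (F : List (List Int)) (m : Int) (hm : 0 ≤ m) (i : Nat)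
    (T : List (List Int)) (hi : i < T.length) :
    pvCell ((filaB F m i T).2) (i:Int) m = (pureFila F m i).getD m.toNat 0 := by
  cases i with
  | zero =>
    rw [filaB_snd_zero, spliceRow_eq]
    show PySem.List.pyGetD (PySem.List.pyGetD _ ((0:Nat):Int) []) m 0 = _
    rw [PySem.List.pyGetD_natCast, getD_set_row, if_pos ⟨rfl, hi⟩,
      pyGetD_nonneg_getD _ m 0 hm
        (by rw [List.length_append]; rw [length_pureFila_zero F m hm]; push_cast; omega),
      getD_append_left _ _ _ (by rw [length_pureFila_zero F m hm]; omega)]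
  | succ i =>
    rw [filaB_snd_succ, spliceRow_eq]
    show PySem.List.pyGetD (PySem.List.pyGetD _ (((i+1:Nat)):Int) []) m 0 = _
    rw [PySem.List.pyGetD_natCast, getD_set_row,
      if_pos ⟨rfl, by rw [length_filaB_snd]; omega⟩,
      pyGetD_nonneg_getD _ m 0 hm
        (by rw [List.length_append]; rw [length_pureFila_succ F m hm]; push_cast; omega),
      getD_append_left _ _ _ (by rw [length_pureFila_succ F m hm]; omega)]

-- pure rows for a negative budget: row 0 is [], every later row is [0]
theorem pureFila_neg_zero (F : List (List Int)) (m : Int) (hm : m+1 ≤ 0) :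
    pureFila F m 0 = [] := by
  show (PySem.List.pyRange 0 (m+1) 1).map (fun j => pvCell F 0 j) = []
  rw [PySem.List.pyRange_one_eq_nil (by omega : m+1 ≤ 0)]
  rfl

theorem pureFila_neg_succ (F : List (List Int)) (m : Int) (hm : m+1 ≤ 0) (i : Nat) :
    pureFila F m (i+1) = [0] := by
  show [0] ++ (PySem.List.pyRange 1 (m+1) 1).map _ = [0]
  rw [PySem.List.pyRange_one_eq_nil (by omega : m+1 ≤ 1)]
  rfl

-- B's table for a negative budget: rows 1..i get column 0 zeroed, everything else unchanged
theorem filaB_neg_spec (F : List (List Int)) (m : Int) (hm : m+1 ≤ 0) (i : Nat)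
    (T : List (List Int)) (hne : ∀ r, r ≤ i → 1 ≤ (T.getD r []).length) :
    ((filaB F m i T).2).length = T.length ∧
    (∀ r, (((filaB F m i T).2).getD r []).length = (T.getD r []).length) ∧
    (∀ r j, (((filaB F m i T).2).getD r []).getD j 0 =
      if 1 ≤ r ∧ r ≤ i ∧ r < T.length ∧ j = 0 then 0 else (T.getD r []).getD j 0) := by
  induction i with
  | zero =>
    rw [filaB_snd_zero, spliceRow_eq, pureFila_neg_zero F m hm]
    simp only [List.nil_append, List.drop_zero, List.length_nil]
    have hrow : ∀ r, ((T.set 0 (T.getD 0 [])).getD r []) = T.getD r [] := by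
      intro r
      rw [getD_set_row]
      split_ifs with h
      · rw [h.1]
      · rfl
    refine ⟨List.length_set .., fun r => by rw [hrow], fun r j => ?_⟩
    rw [hrow, if_neg (by omega)]
  | succ i ih =>
    obtain ⟨il, irl, ig⟩ := ih (fun r hr => hne r (by omega))
    rw [filaB_snd_succ, spliceRow_eq, pureFila_neg_succ F m hm]
    set S := (filaB F m i T).2 with hS
    have hlrow : 1 ≤ (S.getD (i+1) []).length := by
      rw [irl]
      exact hne (i+1) (le_refl _)
    refine ⟨?_, ?_, ?_⟩
    · rw [List.length_set, il]
    · intro r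
      rw [getD_set_row, il]
      split_ifs with h
      · rw [h.1, List.length_append, List.length_drop, irl, List.length_singleton]
        have := hne (i+1) (le_refl _)
        omega
      · exact irl r
    · intro r j
      rw [getD_set_row, il]
      by_cases h : r = i+1 ∧ i+1 < T.length
      · rw [if_pos h, h.1]
        cases j with
        | zero =>
          rw [if_pos ⟨by omega, by omega, by omega, rfl⟩]
          rfl
        | succ j0 =>
          rw [if_neg (by omega)]
          simp only [List.length_singleton]
          rw [show ([0] ++ (S.getD (i+1) []).drop 1 : List Int)
              = 0 :: (S.getD (i+1) []).drop 1 from rfl,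
            List.getD_cons_succ, getD_drop, ig (i+1) (1+j0), if_neg (by omega), Nat.add_comm 1 j0]
      · rw [if_neg h, ig r j]
        by_cases hr : r = i+1
        · have hnl : ¬ (i+1 < T.length) := fun hlt => h ⟨hr, hlt⟩
          rw [if_neg (fun hx => hnl (by omega)), if_neg (fun hx => hnl (by omega))]
        · by_cases hc : 1 ≤ r ∧ r ≤ i ∧ r < T.length ∧ j = 0
          · rw [if_pos hc, if_pos ⟨hc.1, by omega, hc.2.2.1, hc.2.2.2⟩]
          · rw [if_neg hc, if_neg (fun hx => hc ⟨hx.1, by omega, hx.2.2.1, hx.2.2.2⟩)]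

-- ---------- the two ports, case by case ----------

-- main case n ≥ 1, m ≥ 0: A's value is the pure DP row n-1 at m
theorem A_main (F I : List (List Int)) (n m : Int) (hn : 0 < n) (hm : 0 ≤ m)
    (hnI : n ≤ (I.length:Int))
    (hne : ∀ i, i < n.toNat → 1 ≤ (I.getD i []).length)
    (hI0 : m+1 ≤ ((I.getD 0 []).length:Int))
    (hIr : ∀ i, 1 ≤ i → i < n.toNat → 0 < m → m+1 ≤ ((I.getD i []).length:Int)) :
    intereses F I n m = (pureFila F m (n.toNat - 1)).getD m.toNat 0 := by
  unfold intereses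
  dsimp only
  set N := n.toNat with hN
  set M := m.toNat with hM
  have hnN : n = (N:Int) := by omega
  have hmM : m = (M:Int) := by omega
  have hN1 : 1 ≤ N := by omega
  rw [hnN, hmM]
  obtain ⟨l1l, l1rl, l1hi, l1lo⟩ := loop1_spec I N
  set T1 := (PySem.List.pyRange 0 (N:Int) 1).foldl (fun acc i => pvSet acc i 0 0) I with hT1
  obtain ⟨l2l, l2ne, l2rl, l2g⟩ := loop2_spec F T1 (M+1)
  rw [show (M:Int)+1 = ((M+1:Nat):Int) from by push_cast; ring]
  set T2 := (PySem.List.pyRange 0 ((M+1:Nat):Int) 1).foldl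
    (fun acc j => pvSet acc 0 j (pvCell F 0 j)) T1 with hT2
  have hrowlen : ∀ r, r < N → M < (T2.getD r []).length := by
    intro r hr
    by_cases h0 : r = 0
    · subst h0
      rw [l2rl, l1rl]
      omega
    · rw [l2ne r h0, l1rl]
      by_cases hM0 : M = 0
      · have := hne r (by omega)
        omega
      · have := hIr r (by omega) (by omega) (by omega)
        omega
  have hT2len : T2.length = I.length := by rw [l2l, l1l]
  have h0v : ∀ j, j ≤ M → (T2.getD 0 []).getD j 0 = (pureFila F ((M:Nat):Int) 0).getD j 0 := by
    intro j hj
    have hl : j < (T1.getD 0 []).length := by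
      rw [l1rl]
      omega
    rw [l2g j, if_pos ⟨by omega, hl⟩, pureFila_zero F M j hj]
  have hcv : ∀ r, 1 ≤ r → r ≤ N-1 → (T2.getD r []).getD 0 0 = 0 := by
    intro r h1 h2
    rw [l2ne r (by omega), l1lo r (by omega), getD_set_int,
      if_pos ⟨rfl, by have := hne r (by omega); omega⟩]
  have hNsplit : (N:Int) = ((N-1:Nat):Int)+1 := by omega
  obtain ⟨l3l, l3rl, l3hi, l3val⟩ := loop3_spec F M (N-1) T2
    (by rw [hT2len]; omega)
    (fun r hr => hrowlen r (by omega))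
    h0v hcv
  rw [hNsplit, show ((M+1:Nat):Int) = (M:Int)+1 from by push_cast; ring]
  set T3 := (PySem.List.pyRange 1 (((N-1:Nat):Int)+1) 1).foldl
    (fun acc i => (PySem.List.pyRange 1 (((M:Nat):Int)+1) 1).foldl
      (fun a j => pvSet a i j (pvIntMax a F i j)) acc) T2 with hT3
  rw [show ((N-1:Nat):Int)+1-1 = ((N-1:Nat):Int) from by ring, pvCell_natCast]
  exact l3val (N-1) (le_refl _) M (le_refl _)

theorem B_main (F I : List (List Int)) (n m : Int) (hn : 0 < n) (hm : 0 ≤ m)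
    (hnI : n ≤ (I.length:Int)) :
    intereses_alt F I n m = (pureFila F m (n.toNat - 1)).getD m.toNat 0 := by
  unfold intereses_alt
  dsimp only
  rw [if_pos hn, show n-1 = ((n.toNat-1:Nat):Int) from by omega]
  exact read_filaB_snd F m hm (n.toNat-1) I (by omega)

-- negative budget, n ≥ 1: A reads row n-1 with its column 0 zeroed
theorem A_neg (F I : List (List Int)) (n m : Int) (hn : 0 < n) (hm : m < 0)
    (hnI : n ≤ (I.length:Int)) :
    intereses F I n m = PySem.List.pyGetD ((I.getD (n.toNat - 1) []).set 0 0) m 0 := by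
  unfold intereses
  dsimp only
  set N := n.toNat with hN
  have hnN : n = (N:Int) := by omega
  rw [hnN]
  obtain ⟨l1l, l1rl, l1hi, l1lo⟩ := loop1_spec I N
  set T1 := (PySem.List.pyRange 0 (N:Int) 1).foldl (fun acc i => pvSet acc i 0 0) I with hT1
  rw [PySem.List.pyRange_one_eq_nil (show m+1 ≤ (0:Int) from by omega), List.foldl_nil]
  simp only [PySem.List.pyRange_one_eq_nil (show m+1 ≤ (1:Int) from by omega), List.foldl_nil]
  rw [foldl_const]
  show PySem.List.pyGetD (PySem.List.pyGetD T1 ((N:Int)-1) []) m 0 = _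
  rw [show (N:Int)-1 = ((N-1:Nat):Int) from by omega, PySem.List.pyGetD_natCast,
    l1lo (N-1) (by omega)]

-- n ≤ 0: A only runs its second loop (row 0 := F[0] when m ≥ 0)
theorem A_nonpos (F I : List (List Int)) (n m : Int) (hn : n ≤ 0) :
    intereses F I n m = pvCell ((PySem.List.pyRange 0 (m+1) 1).foldl
      (fun acc j => pvSet acc 0 j (pvCell F 0 j)) I) (n-1) m := by
  unfold intereses
  dsimp only
  rw [PySem.List.pyRange_one_eq_nil (show n ≤ (0:Int) from hn), List.foldl_nil,
    PySem.List.pyRange_one_eq_nil (show n ≤ (1:Int) from by omega), List.foldl_nil]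

theorem B_nonpos (F I : List (List Int)) (n m : Int) (hn : n ≤ 0) :
    intereses_alt F I n m = pvCell I (n-1) m := by
  unfold intereses_alt
  rw [if_neg (by omega)]


-- negative budget, n ≥ 1: the two final reads, and when they (alone) can differ
theorem neg_read (F I : List (List Int)) (n m : Int) (hn : 0 < n) (hm : m < 0)
    (hnI : n ≤ (I.length:Int))
    (hne : ∀ i, i < n.toNat → 1 ≤ (I.getD i []).length)
    (hMR : PySem.Raise.InRange (PySem.List.pyGetD I (n-1) []).length m) :
    ((¬ (n = 1 ∧ ((I.getD 0 []).length:Int) + m = 0)) →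
      intereses F I n m = intereses_alt F I n m) ∧
    ((n = 1 ∧ ((I.getD 0 []).length:Int) + m = 0) →
      intereses F I n m = 0 ∧ intereses_alt F I n m = (I.getD 0 []).getD 0 0) := by
  set N := n.toNat with hN
  have hN1 : 1 ≤ N := by omega
  have hcast : n - 1 = ((N-1:Nat):Int) := by omega
  have hMR' : PySem.Raise.InRange (I.getD (N-1) []).length m := by
    rwa [hcast, PySem.List.pyGetD_natCast] at hMR
  have hb : -(((I.getD (N-1) []).length:Nat):Int) ≤ m ∧ m < ((I.getD (N-1) []).length:Int) := by
    simpa [PySem.Raise.InRange] using hMR'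
  set k := (-m).toNat with hk
  have hk1 : 0 < k := by omega
  have hklen : k ≤ (I.getD (N-1) []).length := by omega
  have hmk : m = -((k:Nat):Int) := by omega
  have hA : intereses F I n m
      = if (I.getD (N-1) []).length - k = 0 ∧ 0 < (I.getD (N-1) []).length then 0
        else (I.getD (N-1) []).getD ((I.getD (N-1) []).length - k) 0 := by
    rw [A_neg F I n m hn hm hnI, ← hN,
      pyGetD_neg_getD' _ m 0 hm (by rw [List.length_set]; push_cast; omega),
      List.length_set, getD_set_int]
  obtain ⟨bl, brl, bg⟩ := filaB_neg_spec F m (by omega) (N-1) I (fun r hr => hne r (by omega))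
  have hB : intereses_alt F I n m
      = if 1 ≤ N-1 ∧ N-1 ≤ N-1 ∧ N-1 < I.length ∧ (I.getD (N-1) []).length - k = 0 then 0
        else (I.getD (N-1) []).getD ((I.getD (N-1) []).length - k) 0 := by
    unfold intereses_alt
    dsimp only
    rw [if_pos hn]
    show PySem.List.pyGetD (PySem.List.pyGetD ((filaB F m (n-1).toNat I).2) (n-1) []) m 0 = _
    rw [show (n-1).toNat = N-1 from by omega, hcast, PySem.List.pyGetD_natCast,
      pyGetD_neg_getD' _ m 0 hm (by rw [brl]; push_cast; omega), brl (N-1), bg]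
  constructor
  · intro hnot
    rw [hA, hB]
    by_cases hq : (I.getD (N-1) []).length - k = 0
    · by_cases h1 : N - 1 = 0
      · exfalso
        apply hnot
        refine ⟨by omega, ?_⟩
        have hIl : I.getD 0 [] = I.getD (N-1) [] := by rw [h1]
        rw [hIl]
        omega
      · rw [if_pos ⟨hq, by omega⟩, if_pos ⟨by omega, le_refl _, by omega, hq⟩]
    · rw [if_neg (by omega), if_neg (by omega)]
  · intro h
    obtain ⟨h1, h2⟩ := h
    have h0 : N - 1 = 0 := by omega
    have hIl : I.getD (N-1) [] = I.getD 0 [] := by rw [h0]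
    have hq : (I.getD (N-1) []).length - k = 0 := by rw [hIl]; omega
    constructor
    · rw [hA, if_pos ⟨hq, by omega⟩]
    · rw [hB, if_neg (by omega), hIl, show (I.getD 0 []).length - k = 0 from by rw [hIl] at hq; exact hq]

-- n ≤ 0: the two final reads, and when they (alone) can differ
theorem nonpos_read (F I : List (List Int)) (n m : Int) (hn : n ≤ 0) (hm : 0 ≤ m)
    (hIR : PySem.Raise.InRange I.length (n-1))
    (hMR : PySem.Raise.InRange (PySem.List.pyGetD I (n-1) []).length m) :
    (((I.length:Int) ≠ 1 - n) → intereses F I n m = intereses_alt F I n m) ∧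
    (((I.length:Int) = 1 - n) → intereses F I n m = (F.getD 0 []).getD m.toNat 0
      ∧ intereses_alt F I n m = (I.getD 0 []).getD m.toNat 0) := by
  have hbI : -((I.length:Nat):Int) ≤ n-1 ∧ n-1 < (I.length:Int) := by
    simpa [PySem.Raise.InRange] using hIR
  set M := m.toNat with hM
  set k0 := (1-n).toNat with hk0
  have hk01 : 0 < k0 := by omega
  have hk0len : k0 ≤ I.length := by omega
  have hnk : n - 1 = -((k0:Nat):Int) := by omega
  have hmM : m = ((M:Nat):Int) := by omega
  obtain ⟨l2l, l2ne, l2rl, l2g⟩ := loop2_spec F I (M+1)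
  have hrowI : PySem.List.pyGetD I (n-1) [] = I.getD (I.length - k0) [] := by
    rw [hnk, pyGetD_neg_getD_row I k0 hk01 hk0len]
  have hbM : m < ((I.getD (I.length - k0) []).length:Int) := by
    have := hMR
    rw [hrowI] at this
    have h2 : -(((I.getD (I.length - k0) []).length:Nat):Int) ≤ m
        ∧ m < ((I.getD (I.length - k0) []).length:Int) := by
      simpa [PySem.Raise.InRange] using this
    exact h2.2
  have hA : intereses F I n m
      = (((PySem.List.pyRange 0 (((M+1:Nat)):Int) 1).foldl
          (fun acc j => pvSet acc 0 j (pvCell F 0 j)) I).getD (I.length - k0) []).getD M 0 := by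
    rw [A_nonpos F I n m hn, show m+1 = ((M+1:Nat):Int) from by omega]
    show PySem.List.pyGetD (PySem.List.pyGetD _ (n-1) []) m 0 = _
    rw [hnk, pyGetD_neg_getD_row _ k0 hk01 (by rw [l2l]; exact hk0len), l2l, hmM,
      PySem.List.pyGetD_natCast]
  have hB : intereses_alt F I n m = (I.getD (I.length - k0) []).getD M 0 := by
    rw [B_nonpos F I n m hn]
    show PySem.List.pyGetD (PySem.List.pyGetD I (n-1) []) m 0 = _
    rw [hrowI, hmM, PySem.List.pyGetD_natCast]
  constructor
  · intro hne
    have hq : I.length - k0 ≠ 0 := by omega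
    rw [hA, hB, l2ne _ hq]
  · intro heq
    have hq : I.length - k0 = 0 := by omega
    rw [hA, hB, hq, l2g M, if_pos ⟨by omega, by rw [hq] at hbM; omega⟩]
    exact ⟨rfl, rfl⟩

-- ===== VERDICT (by name: the statement is the Claim_ definition above) =====
theorem intereses_spec : Claim_unchanged_intereses := by
  intro F I n m hDom hPre
  unfold Spec_intereses
  intro hD
  obtain ⟨hp1, hp2, hp3, hp4, hp5⟩ := hPre
  by_cases hn : 0 < n
  · obtain ⟨hnI, hne⟩ := hp1 hn
    by_cases hm : 0 ≤ m
    · obtain ⟨_, _, _, hI0⟩ := hp2 hm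
      have hIr : ∀ i, 1 ≤ i → i < n.toNat → 0 < m → m+1 ≤ ((I.getD i []).length:Int) := by
        intro i h1 h2 h3
        exact (hp3 (by omega) h3).2.1 i h2
      rw [A_main F I n m hn hm hnI hne hI0 hIr, B_main F I n m hn hm hnI]
    · by_cases hc : n = 1 ∧ ((I.getD 0 []).length:Int) + m = 0
      · by_cases hz : (I.getD 0 []).getD 0 0 = 0
        · obtain ⟨e1, e2⟩ := (neg_read F I n m hn (by omega) hnI hne hp5).2 hc
          rw [e1, e2, hz]
        · exact absurd (Or.inr ⟨hc.1, by omega, hc.2, hz⟩) hD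
      · exact (neg_read F I n m hn (by omega) hnI hne hp5).1 hc
  · by_cases hm : 0 ≤ m
    · by_cases hc : (I.length:Int) = 1 - n
      · by_cases hz : (I.getD 0 []).getD m.toNat 0 = (F.getD 0 []).getD m.toNat 0
        · obtain ⟨e1, e2⟩ := (nonpos_read F I n m (by omega) hm hp4 hp5).2 hc
          rw [e1, e2, hz]
        · exact absurd (Or.inl ⟨by omega, hm, hc, hz⟩) hD
      · exact (nonpos_read F I n m (by omega) hm hp4 hp5).1 hc
    · rw [A_nonpos F I n m (by omega), B_nonpos F I n m (by omega),
        PySem.List.pyRange_one_eq_nil (show m+1 ≤ (0:Int) from by omega), List.foldl_nil]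

theorem intereses_changed : Claim_changed_intereses := by
  unfold Claim_changed_intereses
  decide

theorem intereses_tight : Claim_exact_intereses := by
  intro F I n m hDom hPre hD
  obtain ⟨hp1, hp2, hp3, hp4, hp5⟩ := hPre
  cases hD with
  | inl h =>
    obtain ⟨h1, h2, h3, h4⟩ := h
    obtain ⟨e1, e2⟩ := (nonpos_read F I n m h1 h2 hp4 hp5).2 h3
    rw [e1, e2]
    exact fun he => h4 he.symm
  | inr h =>
    obtain ⟨h1, h2, h3, h4⟩ := h
    obtain ⟨hnI, hne⟩ := hp1 (by omega)
    obtain ⟨e1, e2⟩ := (neg_read F I n m (by omega) h2 hnI hne hp5).2 ⟨h1, h3⟩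
    rw [e1, e2]
    exact fun he => h4 he.symm
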